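-- pv_equiv track=rewrite | github.com/lumenarx/python_exercises_study_project | src/python_exercises/chapter_5.py | only_words
-- ===== SOURCE A (Python) =====
-- def only_words(line):
--     line_copy = ""
--     n = len(line)
--     for i in range(n):
--         if (i != n - 1 and line[i] == "'" and line[i + 1] != " " and line[i + 1] != "'") or (
--                 line[i] == "'" and i == n - 1):
--             line_copy += line[i].lower()
--         elif line[i] != "'" and line[i] != "!" and line[i] != "?" and line[i] != "." \
--                 and line[i] != "," and line[i] != ":" and line[i] != ";" \
--                 and line[i] != "-" and line[i] != "_" and line[i] != "+":
--             line_copy += line[i].lower()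
--     words = line_copy.split()
--     return words
-- ===== SOURCE B (Python) =====
-- def only_words(line):
--     # Stage 1: split on apostrophes; a separator is kept only when its following
--     # piece starts with a non-space character, or it ends the line (empty last piece).
--     pieces = line.split("'")
--     last = len(pieces) - 1
--     glued = pieces[0] + "".join(
--         ("'" + p) if (p and p[0] != " ") or (i == last and not p) else p
--         for i, p in enumerate(pieces[1:], 1))
--     # Stage 2: drop fixed punctuation, lowercase, split into words.
--     cleaned = "".join(c for c in glued if c not in "!?.,:;-_+").lower()
--     return cleaned.split()
-- ===== Notes on version B (the rewrite author's own statement) =====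
-- stated objective: faster
-- what changed: Replaced A's per-index scan (range/length arithmetic, a character lookahead at i+1, and repeated string += concatenation) by a staged split/join pipeline: split the line on apostrophes, decide each separator from the head of its following piece (or its being the trailing empty piece), re-join, then delete the fixed punctuation, lowercase and split into words.
import Mathlib
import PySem

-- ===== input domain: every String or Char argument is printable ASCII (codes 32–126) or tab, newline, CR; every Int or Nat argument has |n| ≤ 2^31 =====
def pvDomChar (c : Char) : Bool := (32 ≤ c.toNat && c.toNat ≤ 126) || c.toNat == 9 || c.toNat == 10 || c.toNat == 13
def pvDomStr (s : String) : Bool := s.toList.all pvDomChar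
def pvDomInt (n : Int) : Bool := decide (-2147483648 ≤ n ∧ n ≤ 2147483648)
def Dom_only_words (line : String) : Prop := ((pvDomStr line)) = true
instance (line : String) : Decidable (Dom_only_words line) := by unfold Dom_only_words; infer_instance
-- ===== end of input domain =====

-- B replaces A's per-index scan (lookahead at i+1) by a staged pipeline: split on
-- apostrophes, decide each separator from its following piece, re-join, strip the
-- fixed punctuation, lowercase, split; equivalence is proved on all inputs.

-- ===== PORT A =====
-- one loop step of A: i-th character appended (lowered) unless filtered; indexing via pyGetD,
-- exact because every read is guarded to be in range (as in Python, where `and` short-circuits)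
def aStep (cs : List Char) (n : Int) (acc : List Char) (i : Int) : List Char :=
  let c := PySem.List.pyGetD cs i ' '
  if ((i != n - 1) && (c == '\'') && (PySem.List.pyGetD cs (i+1) ' ' != ' ')
        && (PySem.List.pyGetD cs (i+1) ' ' != '\''))
      || ((c == '\'') && (i == n - 1)) then
    acc ++ [PySem.Chars.lowerChar c]
  else if (c != '\'') && (c != '!') && (c != '?') && (c != '.') && (c != ',')
        && (c != ':') && (c != ';') && (c != '-') && (c != '_') && (c != '+') then
    acc ++ [PySem.Chars.lowerChar c]
  else
    acc

def only_words (line : String) : List String :=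
  let cs := line.toList
  let n := PySem.List.len cs
  let line_copy := (PySem.List.pyRange 0 n 1).foldl (aStep cs n) []
  (PySem.Chars.split₀ line_copy).map String.ofList   -- line_copy.split(): exact by PySem.Str.split₀_map_toList

-- ===== PORT B =====
def only_words_alt (line : String) : List String :=
  let pieces := PySem.Chars.splitOn line.toList ['\'']   -- line.split("'")
  let last : Int := (pieces.length : Int) - 1
  -- pieces[0]: split always returns a nonempty list, so headD [] is exact
  let glued := pieces.headD [] ++ PySem.Chars.join []
    ((PySem.List.enumerate (pieces.drop 1) 1).map (fun pi =>
      if (pi.2 ≠ [] ∧ pi.2.head? ≠ some ' ') ∨ (pi.1 = last ∧ pi.2 = []) then '\'' :: pi.2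
      else pi.2))
  -- "".join(c for c in glued if c not in "!?.,:;-_+").lower()
  let cleaned := PySem.Chars.lower (PySem.Chars.join []
    ((glued.filter (fun c => !("!?.,:;-_+".toList.contains c))).map (fun c => [c])))
  (PySem.Chars.split₀ cleaned).map String.ofList

-- ===== PRECONDITION & SPEC =====
def Spec_only_words (line : String) (out : List String) : Prop := out = only_words_alt line
instance (line : String) (out : List String) : Decidable (Spec_only_words line out) := by unfold Spec_only_words; infer_instance

-- ===== CLAIM (what is proved, stated in full; the proofs are below) =====
def Claim_equal_only_words : Prop := ∀ (line : String), Dom_only_words line → Spec_only_words line (only_words line)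

-- ===== LEMMAS AND PROOFS =====

-- `apos cs`: cs with exactly the apostrophes A drops removed (an apostrophe followed
-- by a space or another apostrophe); the common reference point of both proofs
def aDrop (c : Char) (h : Option Char) : Bool :=
  (c == '\'') && (h == some ' ' || h == some '\'')

def apos : List Char → List Char
  | [] => []
  | c :: rest => (if aDrop c rest.head? then [] else [c]) ++ apos rest

def notPunct (c : Char) : Bool := !("!?.,:;-_+".toList.contains c)

-- ---- A-side: the indexed fold equals map-lower of the filtered string ----

-- kept (lowered) characters of the suffix, reading the lookahead from the suffix itself
def keepA : List Char → List Char
  | [] => []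
  | c :: rest =>
      (if !aDrop c rest.head? && notPunct c then [PySem.Chars.lowerChar c] else []) ++ keepA rest

theorem elif_char (c : Char) :
    ((c != '\'') && (c != '!') && (c != '?') && (c != '.') && (c != ',')
      && (c != ':') && (c != ';') && (c != '-') && (c != '_') && (c != '+'))
    = (notPunct c && (c != '\'')) := by
  have h : ("!?.,:;-_+".toList) = ['!','?','.',',',':',';','-','_','+'] := rfl
  rw [notPunct, h]
  apply Bool.eq_iff_iff.mpr
  simp only [Bool.and_eq_true, bne_iff_ne, ne_eq, Bool.not_eq_eq_eq_not, Bool.not_true,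
    List.contains_eq_mem, decide_eq_false_iff_not, List.mem_cons, List.not_mem_nil, or_false]
  tauto

theorem aStep_eq (cs : List Char) (k : Nat) (acc : List Char) (hk : k < cs.length) :
    aStep cs (cs.length : Int) acc (k : Int)
      = acc ++ (if !aDrop cs[k] (cs.drop (k+1)).head? && notPunct cs[k]
                then [PySem.Chars.lowerChar cs[k]] else []) := by
  have hc : PySem.List.pyGetD cs (k : Int) ' ' = cs[k] := by
    rw [PySem.List.pyGetD_natCast]; exact List.getD_eq_getElem cs ' ' hk
  by_cases hlast : k + 1 = cs.length
  · have hnone : (cs.drop (k+1)).head? = none := by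
      rw [hlast]; simp
    have hi : ((k : Int) != (cs.length : Int) - 1) = false := by simp; omega
    have hi' : ((k : Int) == (cs.length : Int) - 1) = true := by simp; omega
    rw [aStep, hnone, hc, hi, hi', elif_char]
    simp only [Bool.false_and, Bool.and_true, Bool.false_or]
    cases hq : (cs[k] == '\'') <;>
      cases hp : notPunct cs[k] <;>
        simp_all [aDrop, notPunct]
  · have hlt : k + 1 < cs.length := by omega
    have hd : PySem.List.pyGetD cs ((k : Int) + 1) ' ' = cs[k+1] := by
      have h1 : ((k : Int) + 1) = ((k + 1 : Nat) : Int) := by push_cast; ring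
      rw [h1, PySem.List.pyGetD_natCast]; exact List.getD_eq_getElem cs ' ' hlt
    have hsome : (cs.drop (k+1)).head? = some cs[k+1] := by
      rw [List.drop_eq_getElem_cons hlt]; rfl
    have hi : ((k : Int) != (cs.length : Int) - 1) = true := by simp; omega
    have hi' : ((k : Int) == (cs.length : Int) - 1) = false := by simp; omega
    rw [aStep, hsome, hc, hd, hi, hi', elif_char]
    simp only [Bool.true_and, Bool.and_false, Bool.or_false]
    cases hq : (cs[k] == '\'') <;>
      cases hp : notPunct cs[k] <;>
        cases h1 : (cs[k+1] == ' ') <;>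
          cases h2 : (cs[k+1] == '\'') <;>
            simp_all [aDrop, notPunct]

theorem foldA (cs : List Char) : ∀ (m k : Nat) (acc : List Char), cs.length - k ≤ m →
    (PySem.List.pyRange (k : Int) (cs.length : Int) 1).foldl (aStep cs (cs.length : Int)) acc
      = acc ++ keepA (cs.drop k) := by
  intro m
  induction m with
  | zero =>
      intro k acc h
      have hk : cs.length ≤ k := by omega
      rw [PySem.List.pyRange_one_eq_nil (by exact_mod_cast hk)]
      simp [List.drop_eq_nil_of_le hk, keepA]
  | succ m ih =>
      intro k acc h
      by_cases hk : k < cs.length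
      · rw [PySem.List.pyRange_one_cons (by exact_mod_cast hk)]
        simp only [List.foldl_cons]
        have : ((k : Int) + 1) = ((k + 1 : Nat) : Int) := by push_cast; ring
        rw [aStep_eq cs k acc hk, this, ih (k+1) _ (by omega)]
        conv_rhs => rw [List.drop_eq_getElem_cons hk]
        simp [keepA]
      · have hk' : cs.length ≤ k := by omega
        rw [PySem.List.pyRange_one_eq_nil (by exact_mod_cast hk')]
        simp [List.drop_eq_nil_of_le hk', keepA]

theorem keepA_eq (cs : List Char) :
    keepA cs = (apos cs |>.filter notPunct).map PySem.Chars.lowerChar := by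
  induction cs with
  | nil => simp [keepA, apos]
  | cons c rest ih =>
      rw [keepA, apos, ih]
      by_cases hd : aDrop c rest.head? = true
      · simp [hd]
      · simp only [Bool.not_eq_true] at hd
        cases hp : notPunct c <;> simp [hd, hp]

-- ---- B-side: split/join equals apos ----

theorem join_nil_cons (x : List Char) (xs : List (List Char)) :
    PySem.Chars.join [] (x :: xs) = x ++ PySem.Chars.join [] xs := by
  cases xs <;> simp [PySem.Chars.join, List.intercalate]

-- reference splitter: accumulator form of line.split("'")
def splitCh : List Char → List Char → List (List Char)
  | pre, [] => [pre]
  | pre, c :: rest => if c = '\'' then pre :: splitCh [] rest else splitCh (pre ++ [c]) rest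

theorem splitCh_ne_nil (cs pre : List Char) : splitCh pre cs ≠ [] := by
  induction cs generalizing pre with
  | nil => simp [splitCh]
  | cons c rest ih => by_cases h : c = '\'' <;> simp [splitCh, h, ih]

theorem splitCh_first (cs : List Char) : ∀ (pre : List Char),
    ∃ w t, splitCh pre cs = (pre ++ w) :: t := by
  induction cs with
  | nil => intro pre; exact ⟨[], [], by simp [splitCh]⟩
  | cons c rest ih =>
      intro pre
      by_cases h : c = '\''
      · exact ⟨[], splitCh [] rest, by simp [splitCh, h]⟩
      · obtain ⟨w, t, hw⟩ := ih (pre ++ [c])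
        exact ⟨c :: w, t, by simp [splitCh, h, hw]⟩

theorem go_spec (cs : List Char) : ∀ (fuel : Nat) (cur : List Char) (acc : List (List Char)),
    cs.length ≤ fuel →
    PySem.Chars.splitOn.go ['\''] fuel cs cur acc = acc.reverse ++ splitCh cur.reverse cs := by
  induction cs with
  | nil =>
      intro fuel cur acc _
      cases fuel <;> simp [PySem.Chars.splitOn.go, splitCh]
  | cons c rest ih =>
      intro fuel cur acc h
      obtain ⟨f, rfl⟩ : ∃ f, fuel = f + 1 := ⟨fuel - 1, by simp at h; omega⟩
      rw [PySem.Chars.splitOn.go]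
      simp only [List.isPrefixOf_cons₂, List.isPrefixOf_nil_left, Bool.and_true]
      by_cases hc : c = '\''
      · rw [if_pos (by simp [hc])]
        simp only [List.length_nil, List.length_cons, List.drop_succ_cons, List.drop_zero]
        rw [ih f [] (cur.reverse :: acc) (by simp at h; omega)]
        simp [splitCh, hc]
      · rw [if_neg (by simp [Ne.symm hc])]
        rw [ih f (c :: cur) acc (by simp at h; omega)]
        simp [splitCh, hc]

theorem splitOn_eq (cs : List Char) : PySem.Chars.splitOn cs ['\''] = splitCh [] cs := by
  rw [PySem.Chars.splitOn, go_spec cs (cs.length + 1) [] [] (by omega)]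
  simp

-- glue of the pieces after the first, with the last piece distinguished
def joinGlue : List (List Char) → List Char
  | [] => []
  | [p] => if p = [] ∨ p.head? ≠ some ' ' then '\'' :: p else p
  | p :: q :: t => (if p ≠ [] ∧ p.head? ≠ some ' ' then '\'' :: p else p) ++ joinGlue (q :: t)

-- the ported enumerate-comprehension computes joinGlue (index = last ⟺ last element)
theorem joinZip (t : List (List Char)) : ∀ (k L : Int), L + 1 = k + t.length →
    PySem.Chars.join [] ((PySem.List.enumerate t k).map (fun pi =>
        if (pi.2 ≠ [] ∧ pi.2.head? ≠ some ' ') ∨ (pi.1 = L ∧ pi.2 = []) then '\'' :: pi.2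
        else pi.2))
      = joinGlue t := by
  induction t with
  | nil => intro k L _; simp [joinGlue, PySem.List.enumerate, PySem.Chars.join_nil]
  | cons p t ih =>
      intro k L hL
      rw [show PySem.List.enumerate (p :: t) k = (k, p) :: PySem.List.enumerate t (k + 1) from rfl,
        List.map_cons, join_nil_cons]
      cases t with
      | nil =>
          have hk : k = L := by simp at hL; omega
          simp only [PySem.List.enumerate, List.map_nil, PySem.Chars.join_nil,
            List.append_nil, joinGlue, hk]
          by_cases hp : p = []
          · simp [hp]
          · by_cases hh : p.head? = some ' ' <;> simp [hh, hp]
      | cons q t' =>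
          have hk : (k = L) = False := by
            simp only [List.length_cons] at hL
            simp only [eq_iff_iff, iff_false]
            omega
          rw [ih (k + 1) L (by simp only [List.length_cons] at hL ⊢; push_cast at hL ⊢; omega)]
          simp [joinGlue, hk]

-- the contribution of one separator: kept unless the following text starts with
-- a space or another apostrophe (or nothing follows — then kept)
theorem joinGlue_splitCh (cs : List Char) :
    joinGlue (splitCh [] cs)
      = (if aDrop '\'' cs.head? then [] else ['\'']) ++
          ((splitCh [] cs).headD [] ++ joinGlue ((splitCh [] cs).drop 1)) := by
  cases cs with
  | nil => simp [splitCh, joinGlue, aDrop]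
  | cons c r =>
    by_cases hc : c = '\''
    · subst hc
      obtain ⟨q, t, hq⟩ : ∃ q t, splitCh ([] : List Char) r = q :: t :=
        match h : splitCh ([] : List Char) r with
        | [] => absurd h (splitCh_ne_nil _ _)
        | q :: t => ⟨q, t, rfl⟩
      have hq' : splitCh ([] : List Char) ('\''::r) = [] :: q :: t := by
        simp [splitCh, hq]
      rw [hq']
      simp [joinGlue, aDrop]
    · have hsp : splitCh ([] : List Char) (c::r) = splitCh [c] r := by simp [splitCh, hc]
      obtain ⟨w, t, hw⟩ := splitCh_first r [c]
      simp only [List.singleton_append] at hw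
      rw [hsp, hw]
      have hhead : (c :: w).head? = some c := rfl
      have hdrop : aDrop '\'' (c::r).head? = (c == ' ') := by
        simp only [List.head?_cons, aDrop]
        cases hcs : (c == ' ') <;> simp_all
      rw [hdrop]
      cases t with
      | nil =>
          by_cases hcs : c = ' '
          · subst hcs; simp [joinGlue]
          · simp [joinGlue, hcs]
      | cons q t' =>
          by_cases hcs : c = ' '
          · subst hcs; simp [joinGlue]
          · simp [joinGlue, hcs]

theorem glue_splitCh (cs : List Char) : ∀ (pre : List Char),
    (splitCh pre cs).headD [] ++ joinGlue ((splitCh pre cs).drop 1) = pre ++ apos cs := by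
  induction cs with
  | nil => intro pre; simp [splitCh, joinGlue, apos]
  | cons c rest ih =>
      intro pre
      by_cases hc : c = '\''
      · subst hc
        rw [show splitCh pre ('\''::rest) = pre :: splitCh [] rest from by simp [splitCh],
          List.headD_cons, List.drop_succ_cons, List.drop_zero]
        rw [joinGlue_splitCh rest, ih ([] : List Char)]
        simp [apos, aDrop]
      · simp only [splitCh, if_neg hc]
        rw [ih (pre ++ [c])]
        have ha : aDrop c rest.head? = false := by simp [aDrop, hc]
        simp [apos, ha]

-- ===== VERDICT (by name: the statement is the Claim_ definition above) =====
theorem only_words_spec : Claim_equal_only_words := by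
  intro line _
  unfold Spec_only_words only_words only_words_alt
  simp only [splitOn_eq]
  have hlen : ((splitCh [] line.toList).length : Int) - 1 + 1
      = 1 + ((splitCh [] line.toList).drop 1).length := by
    have : 1 ≤ (splitCh [] line.toList).length := by
      cases h : splitCh [] line.toList with
      | nil => exact absurd h (splitCh_ne_nil _ _)
      | cons a t => simp
    simp only [List.length_drop]
    omega
  rw [joinZip _ 1 _ hlen, glue_splitCh line.toList []]
  simp only [List.nil_append]
  have hfilter : (apos line.toList).filter (fun c => !("!?.,:;-_+".toList.contains c))
      = (apos line.toList).filter notPunct := rfl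
  rw [hfilter, PySem.Chars.join_nil_singletons]
  have hlow : PySem.Chars.lower ((apos line.toList).filter notPunct)
      = ((apos line.toList).filter notPunct).map PySem.Chars.lowerChar := rfl
  rw [hlow, ← keepA_eq]
  rw [show PySem.List.len line.toList = (line.toList.length : Int) from PySem.List.len_eq _]
  rw [show (0 : Int) = ((0 : Nat) : Int) by simp]
  rw [foldA line.toList line.toList.length 0 [] (by omega)]
  simp
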